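-- pv_equiv track=rewrite | github.com/1chooo/my-uni-courses | gs/gs4719/homework/hw02/hw2_0.py | hw2_0
-- ===== SOURCE A (Python) =====
-- def hw2_0(rows=3):
--     output = ''
--     # ======↓請在這個區域寫程式↓=====
--     for i in range(1, rows + 1):
--         for j in range(rows - i):
--             output += " "
--
--         for k in range(i):
--             if i == rows and k == i - 1:
--                 output += "*"
--             elif k == i - 1:
--                 output += "*\n"
--             else:
--                 output += "* "
--     # ======↑請在這個區域寫程式↑=====
--     return output
-- ===== SOURCE B (Python) =====
-- def hw2_0(rows=3):
--     lines = [" " * (rows - i) + " ".join("*" * i) for i in range(1, rows + 1)]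
--     return "\n".join(lines)
-- ===== Notes on version B (the rewrite author's own statement) =====
-- stated objective: simpler
-- what changed: B builds each row as one string via repetition and " ".join and returns "\n".join(lines), replacing A's three nested per-character loops, their repeated string += concatenation, and the sentinel tests that decide where the newline and trailing star go.
import Mathlib
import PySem

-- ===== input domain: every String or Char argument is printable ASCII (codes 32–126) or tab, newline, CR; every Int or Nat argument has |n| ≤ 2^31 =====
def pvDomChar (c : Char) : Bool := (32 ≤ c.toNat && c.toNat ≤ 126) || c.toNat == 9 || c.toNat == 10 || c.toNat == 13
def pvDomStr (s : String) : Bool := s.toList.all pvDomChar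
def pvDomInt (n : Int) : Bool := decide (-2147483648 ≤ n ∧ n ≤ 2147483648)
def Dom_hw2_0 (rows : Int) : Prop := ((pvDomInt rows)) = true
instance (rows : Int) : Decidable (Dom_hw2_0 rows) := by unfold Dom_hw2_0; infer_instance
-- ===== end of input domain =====

-- B builds the pattern line-by-line with string repetition and join instead of A's
-- character-by-character nested loops with sentinel tests (objective: simpler).

-- ===== PORT A =====
-- A accumulates a string character group by character group; ported on List Char
-- (String.ofList at the end) because Lean's own String.append is opaque to the kernel.
def hw2_0 (rows : Int) : String :=
  String.ofList <|
    (PySem.List.pyRange 1 (rows + 1) 1).foldl (fun output i =>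
      let output := (PySem.List.pyRange 0 (rows - i) 1).foldl (fun o _ => o ++ [' ']) output
      (PySem.List.pyRange 0 i 1).foldl (fun o k =>
        if i = rows ∧ k = i - 1 then o ++ ['*']
        else if k = i - 1 then o ++ ['*', '\n']
        else o ++ ['*', ' ']) output) []

-- ===== PORT B =====
-- " ".join("*" * i)  — joining the characters of a string of i stars with single spaces
def pvLineB (rows i : Int) : List Char :=
  List.replicate (rows - i).toNat ' ' ++ List.intercalate [' '] (List.replicate i.toNat ['*'])

def hw2_0_alt (rows : Int) : String :=
  String.ofList (List.intercalate ['\n'] ((PySem.List.pyRange 1 (rows + 1) 1).map (pvLineB rows)))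

-- ===== PRECONDITION & SPEC =====
def Spec_hw2_0 (rows : Int) (out : String) : Prop := out = hw2_0_alt rows
instance (rows : Int) (out : String) : Decidable (Spec_hw2_0 rows out) := by unfold Spec_hw2_0; infer_instance

-- ===== CLAIM (what is proved, stated in full; the proofs are below) =====
def Claim_equal_hw2_0 : Prop := ∀ (rows : Int), Dom_hw2_0 rows → Spec_hw2_0 rows (hw2_0 rows)

-- ===== LEMMAS AND PROOFS =====

-- the i-th row as A emits it (after flattening A's two inner loops)
def pvRowA (rows i : Int) : List Char :=
  (PySem.List.pyRange 0 (rows - i) 1).flatMap (fun _ => [' ']) ++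
  (PySem.List.pyRange 0 i 1).flatMap (fun k =>
    if i = rows ∧ k = i - 1 then ['*']
    else if k = i - 1 then ['*', '\n']
    else ['*', ' '])

lemma pv_map_const {α : Type} (l : List α) (c : List Char) :
    l.map (fun _ => c) = List.replicate l.length c := by
  induction l with
  | nil => simp
  | cons x t ih => simp [ih, List.replicate_succ]

lemma pv_flatMap_const {α : Type} (l : List α) (c : List Char) :
    l.flatMap (fun _ => c) = List.flatten (List.replicate l.length c) := by
  rw [List.flatMap_def, pv_map_const]

lemma pv_starline_succ (n : Nat) :
    List.intercalate [' '] (List.replicate (n + 1) ['*']) =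
      List.flatten (List.replicate n ['*', ' ']) ++ ['*'] := by
  induction n with
  | zero => simp [List.intercalate]
  | succ m ih =>
    rw [List.replicate_succ (n := m + 1), List.replicate_succ (n := m) (a := (['*', ' '] : List Char))]
    rw [List.replicate_succ] at ih
    simp only [List.intercalate] at ih ⊢
    rw [List.replicate_succ, List.intersperse_cons₂]
    simp [ih]

lemma pvRowA_eq (rows i : Int) (h1 : 1 ≤ i) :
    pvRowA rows i = pvLineB rows i ++ (if i = rows then [] else ['\n']) := by
  unfold pvRowA pvLineB
  have hsplit : PySem.List.pyRange 0 i 1 =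
      PySem.List.pyRange 0 (i - 1) 1 ++ [i - 1] := by
    have := PySem.List.pyRange_one_succ_right (a := 0) (b := i - 1) (by omega)
    simpa using this
  have hspaces : (PySem.List.pyRange 0 (rows - i) 1).flatMap (fun _ => ([' '] : List Char)) =
      List.replicate (rows - i).toNat ' ' := by
    have hlen := PySem.List.length_pyRange_one 0 (rows - i)
    rw [pv_flatMap_const, hlen]
    simp [List.flatten_replicate_singleton]
  have hhead : (PySem.List.pyRange 0 (i - 1) 1).flatMap (fun k =>
      if i = rows ∧ k = i - 1 then (['*'] : List Char)
      else if k = i - 1 then ['*', '\n']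
      else ['*', ' ']) = List.flatten (List.replicate (i - 1).toNat ['*', ' ']) := by
    rw [List.flatMap_def]
    have : (PySem.List.pyRange 0 (i - 1) 1).map (fun k =>
        if i = rows ∧ k = i - 1 then (['*'] : List Char)
        else if k = i - 1 then ['*', '\n']
        else ['*', ' ']) = (PySem.List.pyRange 0 (i - 1) 1).map (fun _ => ['*', ' ']) := by
      apply List.map_congr_left
      intro k hk
      have := (PySem.List.mem_pyRange_one).1 hk
      have hk' : k ≠ i - 1 := by omega
      simp [hk']
    rw [this, pv_map_const, PySem.List.length_pyRange_one]
    simp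
  rw [hsplit, List.flatMap_append, hspaces, hhead]
  have hnat : i.toNat = (i - 1).toNat + 1 := by omega
  rw [hnat, pv_starline_succ]
  by_cases hir : i = rows <;> simp [hir]

-- joining rows 1..r: each non-last row ends with '\n', which is exactly "\n".join
lemma pv_join (g : Int → List Char) (r : Int) (n : Nat) : ∀ a : Int, a + n = r + 1 →
    (PySem.List.pyRange a (r + 1) 1).flatMap (fun i => g i ++ if i = r then [] else ['\n']) =
      List.intercalate ['\n'] ((PySem.List.pyRange a (r + 1) 1).map g) := by
  induction n with
  | zero =>
    intro a ha
    rw [PySem.List.pyRange_one_eq_nil (by omega)]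
    simp [List.intercalate]
  | succ m ih =>
    intro a ha
    rw [PySem.List.pyRange_one_cons (by omega)]
    cases m with
    | zero =>
      have har : a = r := by omega
      rw [PySem.List.pyRange_one_eq_nil (by omega)]
      simp [har, List.intercalate]
    | succ m' =>
      have hne : a ≠ r := by omega
      have ihr := ih (a + 1) (by omega)
      have hcons : PySem.List.pyRange (a + 1) (r + 1) 1 =
          (a + 1) :: PySem.List.pyRange (a + 2) (r + 1) 1 := by
        have := PySem.List.pyRange_one_cons (a := a + 1) (b := r + 1) (by omega)
        simpa [add_assoc] using this
      rw [List.flatMap_cons, ihr, List.map_cons, hcons]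
      simp only [List.map_cons, List.intercalate, List.intersperse, List.flatten_cons]
      simp [hne]

lemma pv_fold_eq (rows : Int) :
    (PySem.List.pyRange 1 (rows + 1) 1).foldl (fun output i =>
      let output := (PySem.List.pyRange 0 (rows - i) 1).foldl (fun o _ => o ++ [' ']) output
      (PySem.List.pyRange 0 i 1).foldl (fun o k =>
        if i = rows ∧ k = i - 1 then o ++ ['*']
        else if k = i - 1 then o ++ ['*', '\n']
        else o ++ ['*', ' ']) output) [] =
      (PySem.List.pyRange 1 (rows + 1) 1).flatMap (pvRowA rows) := by
  rw [PySem.List.foldl_congr_mem _ _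
    (fun (output : List Char) (i : Int) => output ++ pvRowA rows i) _ ?_]
  · exact PySem.List.foldl_append_eq_flatMap _ _ _
  · intro acc i _
    have hstep : (fun (o : List Char) (k : Int) =>
        if i = rows ∧ k = i - 1 then o ++ ['*']
        else if k = i - 1 then o ++ ['*', '\n']
        else o ++ ['*', ' ']) = (fun (o : List Char) (k : Int) =>
        o ++ (if i = rows ∧ k = i - 1 then ['*']
        else if k = i - 1 then ['*', '\n']
        else ['*', ' '])) := by
      funext o k; split_ifs <;> rfl
    simp only [hstep, PySem.List.foldl_append_eq_flatMap, pvRowA, List.append_assoc]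

-- ===== VERDICT (by name: the statement is the Claim_ definition above) =====
theorem hw2_0_spec : Claim_equal_hw2_0 := by
  intro rows _
  unfold Spec_hw2_0 hw2_0 hw2_0_alt
  rw [pv_fold_eq]
  have hflat : (PySem.List.pyRange 1 (rows + 1) 1).flatMap (pvRowA rows) =
      (PySem.List.pyRange 1 (rows + 1) 1).flatMap
        (fun i => pvLineB rows i ++ if i = rows then [] else ['\n']) := by
    rw [List.flatMap_def, List.flatMap_def]
    congr 1
    apply List.map_congr_left
    intro i hi
    have := (PySem.List.mem_pyRange_one).1 hi
    exact pvRowA_eq rows i (by omega)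
  rw [hflat]
  by_cases hrow : 1 ≤ rows
  · exact congrArg String.ofList (pv_join (pvLineB rows) rows rows.toNat 1 (by omega))
  · rw [PySem.List.pyRange_one_eq_nil (by omega)]
    simp [List.intercalate]
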